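-- pv_equiv track=rewrite | github.com/Ale-star-dot/Globe-london | timeout.py | classify_from_jsonld
-- ===== SOURCE A (Python) =====
-- def classify_from_jsonld(item, default_type):
--     type_str = item.get("@type", "")
--     name_l   = item.get("name", "").lower()
--
--     if "Exhibition" in type_str:    return "exhibition"
--     if "Theater"    in type_str:    return "performance"
--     kw_map = {
--         "gallery":     ["opening", "private view", "gallery"],
--         "popup":       ["market", "fair", "pop-up", "open studios"],
--         "performance": ["performance", "dance", "concert", "live"],
--         "talk":        ["talk", "lecture", "workshop", "screening"],
--     }
--     for etype, kws in kw_map.items():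
--         if any(kw in name_l for kw in kws):
--             return etype
--     return default_type
-- ===== SOURCE B (Python) =====
-- # Different algorithm: instead of scanning the keyword table and testing each keyword
-- # against the name, scan the NAME once position by position and look each candidate
-- # substring up in a precomputed hash table keyword -> (priority, event_type), keeping
-- # the hit with the smallest priority (= original group order).  Correct because a
-- # keyword occurs in the name iff some slice of the name equals it, and the first
-- # matching group in A is exactly the minimum-priority keyword that occurs.
--
-- _PRI = {
--     "opening": (0, "gallery"), "private view": (0, "gallery"), "gallery": (0, "gallery"),
--     "market": (1, "popup"), "fair": (1, "popup"), "pop-up": (1, "popup"), "open studios": (1, "popup"),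
--     "performance": (2, "performance"), "dance": (2, "performance"), "concert": (2, "performance"), "live": (2, "performance"),
--     "talk": (3, "talk"), "lecture": (3, "talk"), "workshop": (3, "talk"), "screening": (3, "talk"),
-- }
-- _LENS = [4, 5, 6, 7, 8, 9, 11, 12]  # the distinct keyword lengths
--
-- def classify_from_jsonld(item, default_type):
--     type_str = item.get("@type", "")
--     if "Exhibition" in type_str:
--         return "exhibition"
--     if "Theater" in type_str:
--         return "performance"
--     name_l = item.get("name", "").lower()
--     best = None
--     for i in range(len(name_l)):
--         for L in _LENS:
--             hit = _PRI.get(name_l[i:i + L])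
--             if hit is not None and (best is None or hit[0] < best[0]):
--                 best = hit
--     return best[1] if best is not None else default_type
-- ===== Notes on version B (the rewrite author's own statement) =====
-- stated objective: alternative
-- what changed: Instead of scanning the keyword table and substring-testing each keyword against the name (A), B scans the name once position by position, looks each candidate slice up in a precomputed hash table keyword -> (priority, type), and keeps the hit of minimal priority; the first matching group of A is exactly the minimum-priority keyword occurring in the name.
import Mathlib
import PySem

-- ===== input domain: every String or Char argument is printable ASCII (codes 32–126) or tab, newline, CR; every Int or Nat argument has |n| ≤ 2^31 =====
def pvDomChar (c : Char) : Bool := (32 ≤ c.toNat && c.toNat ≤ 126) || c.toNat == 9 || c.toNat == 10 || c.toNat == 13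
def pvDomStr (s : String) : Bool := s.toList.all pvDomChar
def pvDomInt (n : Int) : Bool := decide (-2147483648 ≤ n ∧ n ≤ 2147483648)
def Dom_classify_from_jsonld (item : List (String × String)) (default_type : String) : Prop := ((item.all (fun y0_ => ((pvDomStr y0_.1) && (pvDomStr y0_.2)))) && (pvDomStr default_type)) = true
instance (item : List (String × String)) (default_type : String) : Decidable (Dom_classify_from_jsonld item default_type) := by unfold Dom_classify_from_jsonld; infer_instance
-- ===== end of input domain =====

-- B scans the NAME position by position, looking candidate slices up in a hash table
-- keyword -> (priority, type) and keeping the smallest priority, instead of A's scan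
-- over the keyword table testing each keyword against the name (objective: alternative).

-- shared helper: Python's item.get(k, "") on an association list (first match)
def pvGet (item : List (String × String)) (k : String) : String :=
  match item.find? (fun p => p.1 == k) with
  | some p => p.2
  | none => ""

-- ===== PORT A =====
-- the kw_map dict literal of A, in insertion order
def pvKwMap : List (String × List String) :=
  [("gallery",     ["opening", "private view", "gallery"]),
   ("popup",       ["market", "fair", "pop-up", "open studios"]),
   ("performance", ["performance", "dance", "concert", "live"]),
   ("talk",        ["talk", "lecture", "workshop", "screening"])]

def classify_from_jsonld (item : List (String × String)) (default_type : String) : String :=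
  let type_str := pvGet item "@type"
  let name_l := PySem.Str.lower (pvGet item "name")
  if PySem.Str.isIn "Exhibition" type_str then "exhibition"
  else if PySem.Str.isIn "Theater" type_str then "performance"
  else
    -- for etype, kws in kw_map.items(): if any(kw in name_l for kw in kws): return etype
    match pvKwMap.find? (fun g => g.2.any (fun kw => PySem.Str.isIn kw name_l)) with
    | some g => g.1
    | none => default_type

-- ===== PORT B =====
-- Source B's _PRI dict: keyword -> (priority = group rank, event type)
def pvPriDict : PySem.Dict String (Int × String) :=
  PySem.Dict.mk
    [("opening", (0, "gallery")), ("private view", (0, "gallery")), ("gallery", (0, "gallery")),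
     ("market", (1, "popup")), ("fair", (1, "popup")), ("pop-up", (1, "popup")), ("open studios", (1, "popup")),
     ("performance", (2, "performance")), ("dance", (2, "performance")), ("concert", (2, "performance")), ("live", (2, "performance")),
     ("talk", (3, "talk")), ("lecture", (3, "talk")), ("workshop", (3, "talk")), ("screening", (3, "talk"))]

-- Source B's _LENS: the distinct keyword lengths
def pvLens : List Int := [4, 5, 6, 7, 8, 9, 11, 12]

-- the body of Source B's outer loop: the inner 'for L in _LENS' loop updating best
def pvBestStep (name_l : String) (best : Option (Int × String)) (i : Int) : Option (Int × String) :=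
  pvLens.foldl (fun best L =>
    match pvPriDict.get? (PySem.Str.slice name_l (some i) (some (i + L))) with
    | some hit =>
        match best with
        | none => some hit
        | some b => if hit.1 < b.1 then some hit else some b
    | none => best) best

def classify_from_jsonld_alt (item : List (String × String)) (default_type : String) : String :=
  let type_str := pvGet item "@type"
  if PySem.Str.isIn "Exhibition" type_str then "exhibition"
  else if PySem.Str.isIn "Theater" type_str then "performance"
  else
    let name_l := PySem.Str.lower (pvGet item "name")
    -- for i in range(len(name_l)): for L in _LENS: ... ; return best[1] if best else default
    match (PySem.List.pyRange 0 (PySem.Str.len name_l) 1).foldl (pvBestStep name_l) none with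
    | some b => b.2
    | none => default_type

-- ===== PRECONDITION & SPEC =====
def Spec_classify_from_jsonld (item : List (String × String)) (default_type : String) (out : String) : Prop := out = classify_from_jsonld_alt item default_type
instance (item : List (String × String)) (default_type : String) (out : String) : Decidable (Spec_classify_from_jsonld item default_type out) := by unfold Spec_classify_from_jsonld; infer_instance

-- ===== CLAIM (what is proved, stated in full; the proofs are below) =====
def Claim_equal_classify_from_jsonld : Prop := ∀ (item : List (String × String)) (default_type : String), Dom_classify_from_jsonld item default_type → Spec_classify_from_jsonld item default_type (classify_from_jsonld item default_type)

-- ===== LEMMAS AND PROOFS =====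

-- Source B's min-update as a binary operation on Option (priority, type)
def pvOmin (b o : Option (Int × String)) : Option (Int × String) :=
  match o with
  | none => b
  | some hit =>
      match b with
      | none => some hit
      | some x => if hit.1 < x.1 then some hit else some x

-- the candidate list produced by slicing name_l at position i
def pvCands (name_l : String) (i : Int) : List (Option (Int × String)) :=
  pvLens.map (fun L => pvPriDict.get? (PySem.Str.slice name_l (some i) (some (i + L))))

theorem pvBestStep_eq (name_l : String) (b : Option (Int × String)) (i : Int) :
    pvBestStep name_l b i = (pvCands name_l i).foldl pvOmin b := by
  rw [pvCands, List.foldl_map, pvBestStep]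
  congr 1
  funext b' L
  cases pvPriDict.get? (PySem.Str.slice name_l (some i) (some (i + L))) <;> rfl

theorem pvOmin_eq_none_iff (b o : Option (Int × String)) :
    pvOmin b o = none ↔ b = none ∧ o = none := by
  cases o with
  | none => simp [pvOmin]
  | some hit => cases b with
    | none => simp [pvOmin]
    | some x => simp only [pvOmin]; split_ifs <;> simp

theorem pvFoldl_omin_eq_none_iff (os : List (Option (Int × String))) (b : Option (Int × String)) :
    os.foldl pvOmin b = none ↔ b = none ∧ ∀ o ∈ os, o = none := by
  induction os generalizing b with
  | nil => simp
  | cons o os ih =>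
      simp only [List.foldl_cons, ih, pvOmin_eq_none_iff, List.mem_cons]
      constructor
      · rintro ⟨⟨hb, ho⟩, h⟩
        exact ⟨hb, fun x hx => hx.elim (fun h' => h' ▸ ho) (h x)⟩
      · rintro ⟨hb, h⟩
        exact ⟨⟨hb, h o (Or.inl rfl)⟩, fun x hx => h x (Or.inr hx)⟩

theorem pvOmin_some (b o : Option (Int × String)) (v : Int × String)
    (h : pvOmin b o = some v) :
    (b = some v ∨ o = some v) ∧ (∀ w, b = some w → v.1 ≤ w.1) ∧ (∀ w, o = some w → v.1 ≤ w.1) := by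
  cases o with
  | none =>
      refine ⟨Or.inl h, ?_, ?_⟩
      · intro w hw
        rw [hw] at h
        cases Option.some.inj h
        exact le_refl _
      · intro w hw; cases hw
  | some hit =>
      cases b with
      | none =>
          refine ⟨Or.inr h, ?_, ?_⟩
          · intro w hw; cases hw
          · intro w hw
            cases Option.some.inj hw
            cases Option.some.inj h
            exact le_refl _
      | some x =>
          simp only [pvOmin] at h
          split_ifs at h with hlt
          · cases Option.some.inj h
            refine ⟨Or.inr rfl, ?_, ?_⟩
            · intro w hw; cases Option.some.inj hw; exact le_of_lt hlt
            · intro w hw; cases Option.some.inj hw; exact le_refl _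
          · cases Option.some.inj h
            refine ⟨Or.inl rfl, ?_, ?_⟩
            · intro w hw; cases Option.some.inj hw; exact le_refl _
            · intro w hw; cases Option.some.inj hw; omega

theorem pvFoldl_omin_some (os : List (Option (Int × String))) (b : Option (Int × String))
    (v : Int × String) (h : os.foldl pvOmin b = some v) :
    (b = some v ∨ some v ∈ os) ∧ (∀ w, b = some w → v.1 ≤ w.1) ∧ (∀ w, some w ∈ os → v.1 ≤ w.1) := by
  induction os generalizing b with
  | nil =>
      refine ⟨Or.inl h, ?_, ?_⟩
      · intro w hw; rw [hw] at h; cases Option.some.inj h; exact le_refl _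
      · intro w hw; cases hw
  | cons o os ih =>
      simp only [List.foldl_cons] at h
      obtain ⟨hmem, hacc, hos⟩ := ih (pvOmin b o) h
      have hcase : ∀ w, (b = some w ∨ o = some w) → v.1 ≤ w.1 := by
        intro w hw
        cases ho : pvOmin b o with
        | none =>
            obtain ⟨hb, ho'⟩ := (pvOmin_eq_none_iff b o).mp ho
            rcases hw with h' | h'
            · rw [h'] at hb; exact absurd hb (by simp)
            · rw [h'] at ho'; exact absurd ho' (by simp)
        | some u =>
            have h1 := hacc u ho
            obtain ⟨-, h2, h3⟩ := pvOmin_some b o u ho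
            rcases hw with h' | h'
            · exact le_trans h1 (h2 w h')
            · exact le_trans h1 (h3 w h')
      refine ⟨?_, fun w hw => hcase w (Or.inl hw), ?_⟩
      · rcases hmem with hm | hm
        · rcases (pvOmin_some b o v hm).1 with h' | h'
          · exact Or.inl h'
          · exact Or.inr (by rw [← h']; exact List.mem_cons_self)
        · exact Or.inr (List.mem_cons_of_mem _ hm)
      · intro w hw
        rcases List.mem_cons.mp hw with hw' | hw'
        · exact hcase w (Or.inr hw'.symm)
        · exact hos w hw'

-- the full multiset of candidates scanned by Source B's double loop
def pvAllCands (name_l : String) : List (Option (Int × String)) :=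
  (PySem.List.pyRange 0 (PySem.Str.len name_l) 1).flatMap (pvCands name_l)

theorem pvFold_eq (name_l : String) :
    (PySem.List.pyRange 0 (PySem.Str.len name_l) 1).foldl (pvBestStep name_l) none
      = (pvAllCands name_l).foldl pvOmin none := by
  rw [pvAllCands, List.foldl_flatMap]
  congr 1
  funext b i
  exact pvBestStep_eq name_l b i

-- a keyword hit: v is the table value of some keyword occurring in name_l
def pvHit (name_l : String) (v : Int × String) : Prop :=
  ∃ kw, (kw, v) ∈ pvPriDict.items ∧ PySem.Str.isIn kw name_l = true

theorem pvLens_pos : ∀ L ∈ pvLens, 0 < L := by decide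

theorem pvMem_cands (name_l : String) (v : Int × String) :
    some v ∈ pvAllCands name_l ↔ pvHit name_l v := by
  constructor
  · intro h
    rw [pvAllCands, List.mem_flatMap] at h
    obtain ⟨i, hi, hc⟩ := h
    rw [pvCands, List.mem_map] at hc
    obtain ⟨L, hL, hf⟩ := hc
    obtain ⟨hi0, hin⟩ := PySem.List.mem_pyRange_one.mp hi
    have hL0 := le_of_lt (pvLens_pos L hL)
    refine ⟨PySem.Str.slice name_l (some i) (some (i + L)),
      PySem.Dict.mem_items_of_get?_eq_some _ hf, ?_⟩
    rw [PySem.Str.isIn_iff_infix, PySem.Str.toList_slice,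
      PySem.Chars.slice_eq_listSlice, PySem.List.slice_toNat _ hi0 (by omega)]
    exact ((List.take_prefix _ _).isInfix).trans (List.drop_suffix _ _).isInfix
  · rintro ⟨kw, hmem, hin⟩
    -- kw occurs in name_l at some position j; the slice there is exactly kw
    have hin' : PySem.Chars.isIn kw.toList name_l.toList = true := by
      simpa using hin
    obtain ⟨j, hpre⟩ := (PySem.Chars.exists_prefix_drop_iff_isIn _ _).mpr hin'
    have hkw : kw.toList ≠ [] ∧ ((kw.toList.length : Int)) ∈ pvLens ∧
        pvPriDict.get? kw = some v := by
      fin_cases hmem <;> exact ⟨by decide, by decide, by decide⟩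
    have hdrop : name_l.toList.drop j ≠ [] := by
      intro hnil
      rw [hnil, List.prefix_nil] at hpre
      exact hkw.1 hpre
    have hj : j < name_l.toList.length := List.length_lt_of_drop_ne_nil hdrop
    rw [pvAllCands, List.mem_flatMap]
    refine ⟨(j : Int), PySem.List.mem_pyRange_one.mpr ⟨Int.natCast_nonneg j, ?_⟩, ?_⟩
    · rw [PySem.Str.len_eq]; exact_mod_cast hj
    · rw [pvCands, List.mem_map]
      refine ⟨(kw.toList.length : Int), hkw.2.1, ?_⟩
      have hslice : PySem.Str.slice name_l (some (j : Int))
          (some ((j : Int) + (kw.toList.length : Int))) = kw := by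
        apply String.toList_inj.mp
        rw [PySem.Str.toList_slice, PySem.Chars.slice_eq_listSlice,
          PySem.List.slice_toNat _ (Int.natCast_nonneg j) (by omega)]
        have h1 : ((j : Int) + (kw.toList.length : Int)).toNat - ((j : Int)).toNat
            = kw.toList.length := by omega
        rw [h1, Int.toNat_natCast, ← List.prefix_iff_eq_take.mp hpre]
      rw [hslice]
      exact hkw.2.2

-- every hit value is one of the four group values
theorem pvHit_cases (name_l : String) (v : Int × String) (h : pvHit name_l v) :
    v = (0, "gallery") ∨ v = (1, "popup") ∨ v = (2, "performance") ∨ v = (3, "talk") := by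
  obtain ⟨kw, hmem, _⟩ := h
  fin_cases hmem <;> simp

-- hit for a given group value ↔ that group's any() in A
theorem pvHit_group (name_l : String) (t : Int) (e : String) (kws : List String)
    (hfwd : ∀ kw, (kw, (t, e)) ∈ pvPriDict.items → kw ∈ kws)
    (hbwd : ∀ kw ∈ kws, (kw, (t, e)) ∈ pvPriDict.items) :
    pvHit name_l (t, e) ↔ kws.any (fun kw => PySem.Str.isIn kw name_l) = true := by
  rw [List.any_eq_true]
  constructor
  · rintro ⟨kw, hmem, hin⟩; exact ⟨kw, hfwd kw hmem, hin⟩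
  · rintro ⟨kw, hkw, hin⟩; exact ⟨kw, hbwd kw hkw, hin⟩

-- if v is a hit, minimal among hits and the unique hit value of its priority,
-- then Source B's scan returns exactly v
theorem pvSelect (nl : String) (v : Int × String)
    (hhit : pvHit nl v)
    (hmin : ∀ w, pvHit nl w → v.1 ≤ w.1)
    (huniq : ∀ w, pvHit nl w → w.1 = v.1 → w = v) :
    (pvAllCands nl).foldl pvOmin none = some v := by
  have hmem : some v ∈ pvAllCands nl := (pvMem_cands nl v).mpr hhit
  cases hres : (pvAllCands nl).foldl pvOmin none with
  | none =>
      obtain ⟨-, hall⟩ := (pvFoldl_omin_eq_none_iff _ _).mp hres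
      exact absurd (hall _ hmem) (by simp)
  | some u =>
      obtain ⟨hu, -, hmin'⟩ := pvFoldl_omin_some _ _ u hres
      have humem : some u ∈ pvAllCands nl := by
        rcases hu with h' | h'
        · exact absurd h' (by simp)
        · exact h'
      have huhit := (pvMem_cands nl u).mp humem
      have h1 := hmin u huhit
      have h2 := hmin' v hmem
      rw [huniq u huhit (le_antisymm h2 h1)]

-- ===== VERDICT (by name: the statement is the Claim_ definition above) =====
theorem classify_from_jsonld_spec : Claim_equal_classify_from_jsonld := by
  intro item default_type _
  unfold Spec_classify_from_jsonld classify_from_jsonld classify_from_jsonld_alt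
  by_cases h1 : PySem.Str.isIn "Exhibition" (pvGet item "@type") = true
  · simp only [h1, if_true]
  · by_cases h2 : PySem.Str.isIn "Theater" (pvGet item "@type") = true
    · simp only [h1, h2, Bool.false_eq_true, if_false, if_true]
    · simp only [h1, h2, Bool.false_eq_true, if_false]
      set nl := PySem.Str.lower (pvGet item "name") with hnl
      rw [pvFold_eq]
      have hg0 := pvHit_group nl 0 "gallery" ["opening", "private view", "gallery"]
        (by intro kw h; simp only [pvPriDict, List.mem_cons, List.not_mem_nil, or_false, Prod.mk.injEq] at h; rcases h with ⟨rfl,heq⟩|⟨rfl,heq⟩|⟨rfl,heq⟩|⟨rfl,heq⟩|⟨rfl,heq⟩|⟨rfl,heq⟩|⟨rfl,heq⟩|⟨rfl,heq⟩|⟨rfl,heq⟩|⟨rfl,heq⟩|⟨rfl,heq⟩|⟨rfl,heq⟩|⟨rfl,heq⟩|⟨rfl,heq⟩|⟨rfl,heq⟩; all_goals first | decide | exact absurd heq (by decide)) (by intro kw h; fin_cases h <;> decide)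
      have hg1 := pvHit_group nl 1 "popup" ["market", "fair", "pop-up", "open studios"]
        (by intro kw h; simp only [pvPriDict, List.mem_cons, List.not_mem_nil, or_false, Prod.mk.injEq] at h; rcases h with ⟨rfl,heq⟩|⟨rfl,heq⟩|⟨rfl,heq⟩|⟨rfl,heq⟩|⟨rfl,heq⟩|⟨rfl,heq⟩|⟨rfl,heq⟩|⟨rfl,heq⟩|⟨rfl,heq⟩|⟨rfl,heq⟩|⟨rfl,heq⟩|⟨rfl,heq⟩|⟨rfl,heq⟩|⟨rfl,heq⟩|⟨rfl,heq⟩; all_goals first | decide | exact absurd heq (by decide)) (by intro kw h; fin_cases h <;> decide)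
      have hg2 := pvHit_group nl 2 "performance" ["performance", "dance", "concert", "live"]
        (by intro kw h; simp only [pvPriDict, List.mem_cons, List.not_mem_nil, or_false, Prod.mk.injEq] at h; rcases h with ⟨rfl,heq⟩|⟨rfl,heq⟩|⟨rfl,heq⟩|⟨rfl,heq⟩|⟨rfl,heq⟩|⟨rfl,heq⟩|⟨rfl,heq⟩|⟨rfl,heq⟩|⟨rfl,heq⟩|⟨rfl,heq⟩|⟨rfl,heq⟩|⟨rfl,heq⟩|⟨rfl,heq⟩|⟨rfl,heq⟩|⟨rfl,heq⟩; all_goals first | decide | exact absurd heq (by decide)) (by intro kw h; fin_cases h <;> decide)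
      have hg3 := pvHit_group nl 3 "talk" ["talk", "lecture", "workshop", "screening"]
        (by intro kw h; simp only [pvPriDict, List.mem_cons, List.not_mem_nil, or_false, Prod.mk.injEq] at h; rcases h with ⟨rfl,heq⟩|⟨rfl,heq⟩|⟨rfl,heq⟩|⟨rfl,heq⟩|⟨rfl,heq⟩|⟨rfl,heq⟩|⟨rfl,heq⟩|⟨rfl,heq⟩|⟨rfl,heq⟩|⟨rfl,heq⟩|⟨rfl,heq⟩|⟨rfl,heq⟩|⟨rfl,heq⟩|⟨rfl,heq⟩|⟨rfl,heq⟩; all_goals first | decide | exact absurd heq (by decide)) (by intro kw h; fin_cases h <;> decide)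
      cases hb0 : (["opening", "private view", "gallery"].any fun kw => PySem.Str.isIn kw nl) with
      | true =>
          have hfold : (pvAllCands nl).foldl pvOmin none = some (0, "gallery") := by
            refine pvSelect nl _ (hg0.mpr hb0) ?_ ?_
            · intro w hw; rcases pvHit_cases nl w hw with rfl | rfl | rfl | rfl <;> norm_num
            · intro w hw hw1; rcases pvHit_cases nl w hw with rfl | rfl | rfl | rfl <;> simp_all
          rw [hfold]
          simp only [pvKwMap, List.find?_cons, hb0]
      | false =>
          cases hb1 : (["market", "fair", "pop-up", "open studios"].any fun kw => PySem.Str.isIn kw nl) with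
          | true =>
              have hfold : (pvAllCands nl).foldl pvOmin none = some (1, "popup") := by
                refine pvSelect nl _ (hg1.mpr hb1) ?_ ?_
                · intro w hw
                  rcases pvHit_cases nl w hw with rfl | rfl | rfl | rfl
                  · exact absurd (hg0.mp hw) (by rw [hb0]; simp)
                  all_goals norm_num
                · intro w hw hw1
                  rcases pvHit_cases nl w hw with rfl | rfl | rfl | rfl
                  · exact absurd (hg0.mp hw) (by rw [hb0]; simp)
                  all_goals simp_all
              rw [hfold]
              simp only [pvKwMap, List.find?_cons, hb0, hb1]
          | false =>
              cases hb2 : (["performance", "dance", "concert", "live"].any fun kw => PySem.Str.isIn kw nl) with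
              | true =>
                  have hfold : (pvAllCands nl).foldl pvOmin none = some (2, "performance") := by
                    refine pvSelect nl _ (hg2.mpr hb2) ?_ ?_
                    · intro w hw
                      rcases pvHit_cases nl w hw with rfl | rfl | rfl | rfl
                      · exact absurd (hg0.mp hw) (by rw [hb0]; simp)
                      · exact absurd (hg1.mp hw) (by rw [hb1]; simp)
                      all_goals norm_num
                    · intro w hw hw1
                      rcases pvHit_cases nl w hw with rfl | rfl | rfl | rfl
                      · exact absurd (hg0.mp hw) (by rw [hb0]; simp)
                      · exact absurd (hg1.mp hw) (by rw [hb1]; simp)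
                      all_goals simp_all
                  rw [hfold]
                  simp only [pvKwMap, List.find?_cons, hb0, hb1, hb2]
              | false =>
                  cases hb3 : (["talk", "lecture", "workshop", "screening"].any fun kw => PySem.Str.isIn kw nl) with
                  | true =>
                      have hfold : (pvAllCands nl).foldl pvOmin none = some (3, "talk") := by
                        refine pvSelect nl _ (hg3.mpr hb3) ?_ ?_
                        · intro w hw
                          rcases pvHit_cases nl w hw with rfl | rfl | rfl | rfl
                          · exact absurd (hg0.mp hw) (by rw [hb0]; simp)
                          · exact absurd (hg1.mp hw) (by rw [hb1]; simp)
                          · exact absurd (hg2.mp hw) (by rw [hb2]; simp)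
                          · norm_num
                        · intro w hw hw1
                          rcases pvHit_cases nl w hw with rfl | rfl | rfl | rfl
                          · exact absurd (hg0.mp hw) (by rw [hb0]; simp)
                          · exact absurd (hg1.mp hw) (by rw [hb1]; simp)
                          · exact absurd (hg2.mp hw) (by rw [hb2]; simp)
                          · rfl
                      rw [hfold]
                      simp only [pvKwMap, List.find?_cons, hb0, hb1, hb2, hb3]
                  | false =>
                      have hfold : (pvAllCands nl).foldl pvOmin none = none := by
                        refine (pvFoldl_omin_eq_none_iff _ _).mpr ⟨rfl, ?_⟩
                        intro o ho
                        cases o with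
                        | none => rfl
                        | some w =>
                            have hw := (pvMem_cands nl w).mp ho
                            rcases pvHit_cases nl w hw with rfl | rfl | rfl | rfl
                            · exact absurd (hg0.mp hw) (by rw [hb0]; simp)
                            · exact absurd (hg1.mp hw) (by rw [hb1]; simp)
                            · exact absurd (hg2.mp hw) (by rw [hb2]; simp)
                            · exact absurd (hg3.mp hw) (by rw [hb3]; simp)
                      rw [hfold]
                      simp only [pvKwMap, List.find?_cons, hb0, hb1, hb2, hb3, List.find?_nil]
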